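-- pv_equiv track=rewrite | github.com/bsnisarchuk-oss/monopoly-game | backend/room_store.py | _get_next_auction_player_id
-- ===== SOURCE A (Python) =====
-- def _get_active_auction_player_ids(auction: dict) -> list[str]:
--     passed_player_ids = set(auction.get("passed_player_ids", []))
--     return [
--         player_id
--         for player_id in auction["eligible_player_ids"]
--         if player_id not in passed_player_ids
--     ]
--
-- def _get_next_auction_player_id(auction: dict, current_player_id: str | None) -> str | None:
--     active_player_ids = _get_active_auction_player_ids(auction)
--
--     if not active_player_ids:
--         return None
--
--     if current_player_id is None or current_player_id not in auction["eligible_player_ids"]: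
--         return active_player_ids[0]
--
--     current_index = auction["eligible_player_ids"].index(current_player_id)
--     total_players = len(auction["eligible_player_ids"])
--
--     for offset in range(1, total_players + 1):
--         candidate = auction["eligible_player_ids"][(current_index + offset) % total_players]
--
--         if candidate in active_player_ids:
--             return candidate
--
--     return active_player_ids[0]
-- ===== SOURCE B (Python) =====
-- def _get_next_auction_player_id(auction, current_player_id):
--     eligible = auction["eligible_player_ids"]
--     passed = set(auction.get("passed_player_ids", []))
--     active = [pid for pid in eligible if pid not in passed]
--     if not active:
--         return None
--     if current_player_id is None or current_player_id not in eligible: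
--         return active[0]
--     pos = {pid: i for i, pid in enumerate(eligible)}
--     current_index = eligible.index(current_player_id)
--     n = len(eligible)
--     return min(active, key=lambda pid: (pos[pid] - current_index - 1) % n)
-- ===== Notes on version B (the rewrite author's own statement) =====
-- stated objective: alternative
-- what changed: Replaces A's offset-by-offset cyclic scan with its per-offset 'candidate in active' list-membership test by a position dict built once plus a single argmin over the active players keyed by forward wrap distance (pos[pid]-current_index-1) % n.
-- outside the precondition, e.g. on _get_next_auction_player_id({'eligible_player_ids': ['a', 'b', 'c', 'b']}, 'a'): A returns 'b', B returns 'c'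
import Mathlib
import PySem

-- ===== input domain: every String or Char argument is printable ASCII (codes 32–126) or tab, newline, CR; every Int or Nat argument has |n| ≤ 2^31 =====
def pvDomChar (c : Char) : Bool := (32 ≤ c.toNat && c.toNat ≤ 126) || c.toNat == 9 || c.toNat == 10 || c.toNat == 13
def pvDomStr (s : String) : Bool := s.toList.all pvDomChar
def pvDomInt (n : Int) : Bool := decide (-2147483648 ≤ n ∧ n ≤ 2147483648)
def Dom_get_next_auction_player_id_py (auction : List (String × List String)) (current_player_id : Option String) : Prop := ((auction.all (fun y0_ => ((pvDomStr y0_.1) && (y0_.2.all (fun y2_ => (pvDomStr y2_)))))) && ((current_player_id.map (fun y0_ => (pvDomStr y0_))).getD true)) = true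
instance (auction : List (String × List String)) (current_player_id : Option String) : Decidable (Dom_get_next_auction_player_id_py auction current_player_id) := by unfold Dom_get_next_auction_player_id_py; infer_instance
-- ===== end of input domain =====

-- B replaces A's offset-by-offset cyclic scan (a list-membership test per offset) by a position
-- table built once plus a single argmin over the active players keyed by forward wrap distance.

-- ===== PORT A =====
-- helper: _get_active_auction_player_ids
def pvActiveA (auction : List (String × List String)) (eligible : List String) : List String :=
  let passedSet := PySem.Set.ofList (PySem.Dict.getD (PySem.Dict.mk auction) "passed_player_ids" [])
  eligible.filter (fun pid => !(PySem.Set.contains passedSet pid))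

-- the 'for offset in range(1, total_players + 1)' loop with its early return
def pvScanA (eligible active : List String) (ci n : Int) : List Int → Option String
  | [] => none
  | off :: rest =>
    match PySem.List.pyGet? eligible (PySem.Int.mod (ci + off) n) with
    | none => none
    | some cand => if cand ∈ active then some cand else pvScanA eligible active ci n rest

def get_next_auction_player_id_py (auction : List (String × List String)) (current_player_id : Option String) : Option String :=
  match PySem.Dict.get? (PySem.Dict.mk auction) "eligible_player_ids" with
  | none => none          -- Python raises KeyError here; excluded by Pre_
  | some eligible =>
    let active := pvActiveA auction eligible
    if active = [] then none
    else
      match current_player_id with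
      | none => PySem.List.pyGet? active 0
      | some c =>
        if c ∈ eligible then
          match PySem.List.index? eligible c with
          | none => none  -- ValueError (unreachable: c ∈ eligible)
          | some ciN =>
            match pvScanA eligible active (ciN : Int) (eligible.length : Int)
                    (PySem.List.pyRange 1 ((eligible.length : Int) + 1) 1) with
            | some r => some r
            | none => PySem.List.pyGet? active 0
        else PySem.List.pyGet? active 0

-- ===== PORT B =====
-- pos = {pid: i for i, pid in enumerate(eligible)}
def pvPosDict (eligible : List String) : PySem.Dict String Int :=
  (PySem.List.enumerate eligible 0).foldl (fun d p => d.insert p.2 p.1) PySem.Dict.empty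

def get_next_auction_player_id_py_alt (auction : List (String × List String)) (current_player_id : Option String) : Option String :=
  match PySem.Dict.get? (PySem.Dict.mk auction) "eligible_player_ids" with
  | none => none          -- Python raises KeyError here; excluded by Pre_
  | some eligible =>
    let passed := PySem.Set.ofList (PySem.Dict.getD (PySem.Dict.mk auction) "passed_player_ids" [])
    let active := eligible.filter (fun pid => !(PySem.Set.contains passed pid))
    if active = [] then none
    else
      match current_player_id with
      | none => PySem.List.pyGet? active 0
      | some c =>
        if c ∈ eligible then
          let pos := pvPosDict eligible
          let ci : Int := ((PySem.List.index? eligible c).getD 0 : Nat)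
          PySem.List.min? active
            (fun pid => PySem.Int.mod (PySem.Dict.getD pos pid 0 - ci - 1) (eligible.length : Int))
        else PySem.List.pyGet? active 0

-- ===== PRECONDITION & SPEC =====
-- Pre_ excludes auctions with no "eligible_player_ids" key (A raises KeyError there) and auctions whose
-- eligible list contains duplicate ids while current_player_id is one of the eligible ids: there A's
-- positional scan and B's position dict may pick between equal ids differently and either answer is
-- defensible (player ids are unique in the application).
def Pre_get_next_auction_player_id_py (auction : List (String × List String)) (current_player_id : Option String) : Prop :=
  (PySem.Dict.get? (PySem.Dict.mk auction) "eligible_player_ids").isSome = true ∧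
  (((PySem.Dict.get? (PySem.Dict.mk auction) "eligible_player_ids").getD []).Nodup ∨
    (current_player_id.map
      (fun c => decide (c ∈ (PySem.Dict.get? (PySem.Dict.mk auction) "eligible_player_ids").getD []))).getD false = false)
instance (auction : List (String × List String)) (current_player_id : Option String) : Decidable (Pre_get_next_auction_player_id_py auction current_player_id) := by
  unfold Pre_get_next_auction_player_id_py; infer_instance

def pvWitness_get_next_auction_player_id_py : (List (String × List String)) × Option String :=
  ([("eligible_player_ids", ["a", "b", "c"]), ("passed_player_ids", ["a"])], some "a")

def Spec_get_next_auction_player_id_py (auction : List (String × List String)) (current_player_id : Option String) (out : Option String) : Prop := out = get_next_auction_player_id_py_alt auction current_player_id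
instance (auction : List (String × List String)) (current_player_id : Option String) (out : Option String) : Decidable (Spec_get_next_auction_player_id_py auction current_player_id out) := by unfold Spec_get_next_auction_player_id_py; infer_instance

-- ===== CLAIM (what is proved, stated in full; the proofs are below) =====
def Claim_equal_get_next_auction_player_id_py : Prop := ∀ (auction : List (String × List String)) (current_player_id : Option String), Dom_get_next_auction_player_id_py auction current_player_id → Pre_get_next_auction_player_id_py auction current_player_id → Spec_get_next_auction_player_id_py auction current_player_id (get_next_auction_player_id_py auction current_player_id)

-- ===== LEMMAS AND PROOFS =====

-- the position dict looks up the (unique) index of a member of a duplicate-free list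
lemma pv_pos_lookup (E : List String) (hnd : E.Nodup) (x : String) (hx : x ∈ E) :
    PySem.Dict.getD (pvPosDict E) x 0 = (List.idxOf x E : Int) := by
  have hlt : List.idxOf x E < E.length := List.idxOf_lt_length_of_mem hx
  have hitems : (pvPosDict E).items
      = PySem.Dict.empty.items ++ (PySem.List.enumerate E 0).map (fun a => (a.2, a.1)) :=
    PySem.Dict.items_foldl_insert_fresh (PySem.List.enumerate E 0) (fun p => p.2) (fun p => p.1)
      PySem.Dict.empty (fun a _ => PySem.Dict.contains_empty _)
      (by rw [PySem.List.map_snd_enumerate]; exact hnd)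
  have hkeys : (pvPosDict E).keys.Nodup :=
    PySem.Dict.nodup_keys_foldl_insert_key (PySem.List.enumerate E 0) (fun p => p.2)
      (fun _ p => p.1) PySem.Dict.empty PySem.Dict.nodup_keys_empty
  have hmem : (x, (List.idxOf x E : Int)) ∈ (pvPosDict E).items := by
    rw [hitems]
    refine List.mem_append_right _ (List.mem_map.mpr ⟨((List.idxOf x E : Int), x), ?_, rfl⟩)
    rw [PySem.List.enumerate_eq_map_pyRange E x]
    refine List.mem_map.mpr ⟨(List.idxOf x E : Int), ?_, ?_⟩
    · rw [PySem.List.mem_pyRange_one]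
      constructor
      · omega
      · simp [PySem.List.len_eq]; exact_mod_cast hlt
    · simp only [PySem.List.pyGetD_natCast]
      rw [List.getD_eq_getElem _ _ hlt, List.getElem_idxOf]
  exact PySem.Dict.getD_of_mem_items _ hmem hkeys 0

lemma pv_mod_shift (ci t c : Int) (ht0 : 0 ≤ t) (htc : t < c) :
    (ci + ((t - ci - 1) % c) + 1) % c = t := by
  obtain ⟨q, hq⟩ : ∃ q, (t - ci - 1) % c = t - ci - 1 - c * q :=
    ⟨(t - ci - 1) / c, by rw [Int.emod_def]⟩
  rw [hq]
  rw [show ci + (t - ci - 1 - c * q) + 1 = t + c * (-q) by ring]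
  rw [Int.add_mul_emod_self_left]
  exact Int.emod_eq_of_lt ht0 htc

lemma pv_mod_round (ci a c : Int) (ha0 : 1 ≤ a) (hac : a ≤ c) :
    (((ci + a) % c) - ci - 1) % c = a - 1 := by
  obtain ⟨q, hq⟩ : ∃ q, (ci + a) % c = ci + a - c * q :=
    ⟨(ci + a) / c, by rw [Int.emod_def]⟩
  rw [hq]
  rw [show ci + a - c * q - ci - 1 = (a - 1) + c * (-q) by ring]
  rw [Int.add_mul_emod_self_left]
  exact Int.emod_eq_of_lt (by omega) (by omega)

lemma pv_scan_reach (E act : List String) (hnd : E.Nodup)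
    (hmemE : ∀ y ∈ act, y ∈ E)
    (ci : Int) (hci0 : 0 ≤ ci) (hcin : ci < (E.length : Int))
    (m : String) (hm : m ∈ act)
    (hmin : ∀ y ∈ act, ((List.idxOf m E : Int) - ci - 1) % (E.length : Int)
                      ≤ ((List.idxOf y E : Int) - ci - 1) % (E.length : Int)) :
    ∀ (fuel : Nat) (a : Int), 1 ≤ a →
      a ≤ ((List.idxOf m E : Int) - ci - 1) % (E.length : Int) + 1 →
      (((List.idxOf m E : Int) - ci - 1) % (E.length : Int) + 1 - a).toNat ≤ fuel →
      pvScanA E act ci (E.length : Int) (PySem.List.pyRange a ((E.length : Int) + 1) 1) = some m := by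
  have hn : (0:Int) < (E.length : Int) := by omega
  have himlt : List.idxOf m E < E.length := List.idxOf_lt_length_of_mem (hmemE m hm)
  intro fuel
  induction fuel using Nat.strong_induction_on with
  | _ fuel ih =>
    intro a h1 h2 h3
    have hdm0 : (0:Int) ≤ ((List.idxOf m E : Int) - ci - 1) % (E.length : Int) :=
      Int.emod_nonneg _ (by omega)
    have hdm1 : ((List.idxOf m E : Int) - ci - 1) % (E.length : Int) < (E.length : Int) :=
      Int.emod_lt_of_pos _ hn
    rw [PySem.List.pyRange_one_cons (by omega)]
    simp only [pvScanA]
    rw [PySem.Int.mod_eq_emod_of_pos hn]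
    have hj0 : (0:Int) ≤ (ci + a) % (E.length : Int) := Int.emod_nonneg _ (by omega)
    have hj1 : (ci + a) % (E.length : Int) < (E.length : Int) := Int.emod_lt_of_pos _ hn
    rw [PySem.List.pyGet?_eq_some_getElem E hj0 hj1]
    have hjlt : ((ci + a) % (E.length : Int)).toNat < E.length := by omega
    split
    next heq => simp at heq
    next cand heq =>
      injection heq with heq
      split_ifs with hx
      · -- candidate is active: it must be m
        have hcE : cand ∈ E := heq ▸ List.getElem_mem hjlt
        have hclt : List.idxOf cand E < E.length := List.idxOf_lt_length_of_mem hcE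
        have hgg : E[List.idxOf cand E]'hclt = E[((ci + a) % (E.length : Int)).toNat]'hjlt := by
          rw [List.getElem_idxOf]
          exact heq.symm
        have hixj : List.idxOf cand E = ((ci + a) % (E.length : Int)).toNat :=
          (hnd.getElem_inj_iff).mp hgg
        have hkey := hmin _ hx
        rw [hixj] at hkey
        rw [Int.toNat_of_nonneg hj0] at hkey
        rw [pv_mod_round ci a (E.length : Int) h1 (by omega)] at hkey
        have hInt : (ci + a) % (E.length : Int) = (List.idxOf m E : Int) := by
          rw [show ci + a = ci + ((List.idxOf m E : Int) - ci - 1) % (E.length : Int) + 1 by omega]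
          exact pv_mod_shift ci (List.idxOf m E : Int) (E.length : Int) (by omega) (by omega)
        have hjm : ((ci + a) % (E.length : Int)).toNat = List.idxOf m E := by omega
        rw [← heq]
        simp only [hjm]
        rw [List.getElem_idxOf]
      · -- candidate not active: a < dm + 1, recurse
        have hane : a ≠ ((List.idxOf m E : Int) - ci - 1) % (E.length : Int) + 1 := by
          intro ha
          apply hx
          have hInt : (ci + a) % (E.length : Int) = (List.idxOf m E : Int) := by
            rw [show ci + a = ci + ((List.idxOf m E : Int) - ci - 1) % (E.length : Int) + 1 by omega]
            exact pv_mod_shift ci (List.idxOf m E : Int) (E.length : Int) (by omega) (by omega)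
          have hjm : ((ci + a) % (E.length : Int)).toNat = List.idxOf m E := by omega
          rw [← heq]
          simp only [hjm]
          rw [List.getElem_idxOf]
          exact hm
        exact ih (fuel - 1) (by omega) (a + 1) (by omega) (by omega) (by omega)

-- ===== VERDICT (by name: the statement is the Claim_ definition above) =====
theorem get_next_auction_player_id_py_spec : Claim_equal_get_next_auction_player_id_py := by
  intro auction cur _dom pre
  obtain ⟨hsome, hpre2⟩ := pre
  unfold Spec_get_next_auction_player_id_py
  unfold get_next_auction_player_id_py get_next_auction_player_id_py_alt
  cases hE : PySem.Dict.get? (PySem.Dict.mk auction) "eligible_player_ids" with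
  | none => rw [hE] at hsome
  | some E =>
    rw [hE] at hpre2
    simp only [Option.getD_some] at hpre2
    simp only [pvActiveA]
    by_cases hact : E.filter (fun pid => !(PySem.Set.contains (PySem.Set.ofList (PySem.Dict.getD (PySem.Dict.mk auction) "passed_player_ids" [])) pid)) = []
    · rw [if_pos hact, if_pos hact]
    · rw [if_neg hact, if_neg hact]
      cases cur with
      | none => rfl
      | some c =>
        dsimp only
        by_cases hc : c ∈ E
        · have hnd : E.Nodup := by
            rcases hpre2 with h | h
            · exact h
            · simp only [Option.map_some, Option.getD_some, decide_eq_false_iff_not] at h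
              exact absurd hc h
          rw [if_pos hc, if_pos hc]
          cases hidx : PySem.List.index? E c with
          | none => exact absurd ((PySem.List.index?_eq_none_iff E c).mp hidx) (by simpa using hc)
          | some k =>
            have hk : k < E.length := by
              obtain ⟨pre, suf, hsplit, hlen, -⟩ := (PySem.List.index?_eq_some_iff E c k).mp hidx
              subst hsplit
              rw [List.length_append, List.length_cons]
              omega
            have hn : (0 : Int) < (E.length : Int) := by
              cases E with
              | nil => cases hc
              | cons h t => simp
            dsimp only
            simp only [Option.getD_some]
            cases hmin? : PySem.List.min? (E.filter (fun pid => !(PySem.Set.contains (PySem.Set.ofList (PySem.Dict.getD (PySem.Dict.mk auction) "passed_player_ids" [])) pid)))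
                (fun pid => PySem.Int.mod (PySem.Dict.getD (pvPosDict E) pid 0 - (k : Int) - 1) (E.length : Int)) with
            | none => exact absurd ((PySem.List.min?_eq_none_iff _ _).mp hmin?) hact
            | some m =>
              have hmAct := PySem.List.min?_mem hmin?
              have hisMin := PySem.List.min?_isMin hmin?
              have hmemE : ∀ y ∈ E.filter (fun pid => !(PySem.Set.contains (PySem.Set.ofList (PySem.Dict.getD (PySem.Dict.mk auction) "passed_player_ids" [])) pid)), y ∈ E :=
                fun y hy => (List.mem_filter.mp hy).1
              have hmin' : ∀ y ∈ E.filter (fun pid => !(PySem.Set.contains (PySem.Set.ofList (PySem.Dict.getD (PySem.Dict.mk auction) "passed_player_ids" [])) pid)),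
                  ((List.idxOf m E : Int) - (k : Int) - 1) % (E.length : Int)
                    ≤ ((List.idxOf y E : Int) - (k : Int) - 1) % (E.length : Int) := by
                intro y hy
                have h := hisMin y hy
                rw [pv_pos_lookup E hnd m (hmemE m hmAct), pv_pos_lookup E hnd y (hmemE y hy),
                  PySem.Int.mod_eq_emod_of_pos hn, PySem.Int.mod_eq_emod_of_pos hn] at h
                exact h
              have hscan := pv_scan_reach E _ hnd hmemE (k : Int) (by omega) (by exact_mod_cast hk)
                m hmAct hmin' E.length 1 (by omega)
                (by have := Int.emod_nonneg ((List.idxOf m E : Int) - (k : Int) - 1) (by omega : (E.length : Int) ≠ 0); omega)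
                (by have := Int.emod_lt_of_pos ((List.idxOf m E : Int) - (k : Int) - 1) hn; omega)
              rw [hscan]
        · rw [if_neg hc, if_neg hc]
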